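-- pv_equiv track=rewrite | github.com/raeez/chiral-bar-cobar | compute/lib/en_factorization_shadow.py | conf_space_euler
-- ===== SOURCE A (Python) =====
-- from math import factorial, comb, prod
--
-- def conf_space_euler(k: int, n: int) -> int:
--     """Euler characteristic of Conf_k(R^n).
--
--     For n = 1: chi = k! (k! points).
--     For n >= 2: chi = prod_{j=0}^{k-1} (1 + j*(-1)^{n-1}).
--         n even (n-1 odd): chi = prod (1 - j) = 0 for k >= 2.
--         n odd (n-1 even): chi = prod (1 + j) = k! for all k.
--     """
--     if k <= 0:
--         return 1
--     if n == 1: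
--         return factorial(k)
--     # For n >= 2:
--     sign = (-1) ** (n - 1)
--     result = 1
--     for j in range(1, k):
--         result *= (1 + j * sign)
--     return result
-- ===== SOURCE B (Python) =====
-- from math import factorial
--
-- def conf_space_euler(k: int, n: int) -> int:
--     # Closed form: no loop. chi(Conf_k(R^n)) = 0 for even n with k >= 2, else k!.
--     if k <= 0:
--         return 1
--     if n % 2 == 0:
--         return 1 if k == 1 else 0
--     return factorial(k)
-- ===== Notes on version B (the rewrite author's own statement) =====
-- stated objective: faster
-- what changed: Replaced the O(k) multiplication loop by a closed form: 0 for even n with k>=2, otherwise math.factorial(k) (library divide-and-conquer factorial).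
-- outside the precondition, e.g. on conf_space_euler(3, 0): A returns -0.0, B returns 0; on conf_space_euler(3, -1): A returns 6.0, B returns 6
import Mathlib
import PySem

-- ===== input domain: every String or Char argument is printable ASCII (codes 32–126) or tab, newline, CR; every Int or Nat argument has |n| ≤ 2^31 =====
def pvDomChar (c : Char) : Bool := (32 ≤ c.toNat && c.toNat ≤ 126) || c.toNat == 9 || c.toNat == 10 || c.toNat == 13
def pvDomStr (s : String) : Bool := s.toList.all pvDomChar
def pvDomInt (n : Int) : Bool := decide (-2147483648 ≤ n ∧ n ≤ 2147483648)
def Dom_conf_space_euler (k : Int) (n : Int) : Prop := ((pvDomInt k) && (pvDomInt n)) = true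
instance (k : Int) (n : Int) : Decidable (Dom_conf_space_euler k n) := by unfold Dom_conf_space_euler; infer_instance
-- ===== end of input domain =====

-- B replaces A's O(k) multiplication loop by a closed form (0 for even n with k ≥ 2, else factorial k).

-- ===== PORT A =====
def conf_space_euler (k : Int) (n : Int) : Int :=
  if k ≤ 0 then 1
  else if n = 1 then (Nat.factorial k.toNat : Int)
  else
    -- sign = (-1) ** (n - 1); exact for n ≥ 1 (Pre_ excludes n ≤ 0 with k ≥ 2, where Python's
    -- negative exponent makes the result a float)
    let sign : Int := (-1) ^ (n - 1).toNat
    (PySem.List.pyRange 1 k 1).foldl (fun result j => result * (1 + j * sign)) 1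

-- ===== PORT B =====
def conf_space_euler_alt (k : Int) (n : Int) : Int :=
  if k ≤ 0 then 1
  else if PySem.Int.mod n 2 = 0 then (if k = 1 then 1 else 0)
  else (Nat.factorial k.toNat : Int)

-- ===== PRECONDITION & SPEC =====
-- Pre_ excludes inputs with n ≤ 0 and k ≥ 2: there Python A computes (-1) ** (negative), a float,
-- so A returns a float (e.g. 0.0), not a value of the declared int type.
def Pre_conf_space_euler (k : Int) (n : Int) : Prop := k ≤ 1 ∨ 1 ≤ n
instance (k : Int) (n : Int) : Decidable (Pre_conf_space_euler k n) := by unfold Pre_conf_space_euler; infer_instance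
def pvWitness_conf_space_euler : Int × Int := (3, 2)
def Spec_conf_space_euler (k : Int) (n : Int) (out : Int) : Prop := out = conf_space_euler_alt k n
instance (k : Int) (n : Int) (out : Int) : Decidable (Spec_conf_space_euler k n out) := by unfold Spec_conf_space_euler; infer_instance

-- ===== CLAIM (what is proved, stated in full; the proofs are below) =====
def Claim_equal_conf_space_euler : Prop := ∀ (k : Int) (n : Int), Dom_conf_space_euler k n → Pre_conf_space_euler k n → Spec_conf_space_euler k n (conf_space_euler k n)

-- ===== LEMMAS AND PROOFS =====

-- once the accumulator is 0, a multiplication fold stays 0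
theorem pv_foldl_mul_zero (f : Int → Int) (l : List Int) :
    l.foldl (fun acc j => acc * f j) 0 = 0 := by
  induction l with
  | nil => rfl
  | cons x xs ih => simpa using ih

-- the odd-n product: prod_{j=1}^{k-1} (1 + j) = k!
theorem pv_foldl_fact (m : Nat) :
    (PySem.List.pyRange 1 (1 + (m : Int)) 1).foldl (fun result j => result * (1 + j * 1)) 1
      = (Nat.factorial (1 + m) : Int) := by
  induction m with
  | zero => simp [PySem.List.pyRange_one_eq_nil, Nat.factorial]
  | succ p ih =>
      have h1 : (1 : Int) ≤ 1 + (p : Int) := by omega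
      have hsplit : (1 : Int) + ((p : Nat) + 1 : Nat) = (1 + (p : Int)) + 1 := by push_cast; ring
      rw [hsplit, PySem.List.pyRange_one_succ_right h1, List.foldl_append, ih]
      simp [Nat.factorial, Nat.succ_eq_add_one]
      ring

theorem conf_space_euler_eq (k n : Int) (hpre : Pre_conf_space_euler k n) :
    conf_space_euler k n = conf_space_euler_alt k n := by
  unfold conf_space_euler conf_space_euler_alt
  by_cases hk0 : k ≤ 0
  · simp [hk0]
  · simp only [hk0, if_false]
    have hmod : PySem.Int.mod n 2 = n % 2 := PySem.Int.mod_eq_emod_of_pos (by omega)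
    by_cases hn1 : n = 1
    · simp [hn1]
    · simp only [hn1, if_false]
      by_cases hk1 : k = 1
      · subst hk1
        have hnil : PySem.List.pyRange 1 1 1 = [] := PySem.List.pyRange_one_eq_nil (by omega)
        simp [hnil]
      · -- k ≥ 2
        have hk2 : 2 ≤ k := by omega
        have hn1' : 1 ≤ n := by rcases hpre with h | h <;> omega
        have hn2 : 2 ≤ n := by omega
        by_cases hev : n % 2 = 0
        · -- n even: sign = -1, the j = 1 factor is 0 and the product stays 0
          have hodd : Odd (n - 1).toNat := ⟨(n / 2).toNat - 1, by omega⟩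
          have hsign : ((-1 : Int)) ^ (n - 1).toNat = -1 := Odd.neg_one_pow hodd
          rw [PySem.List.pyRange_one_cons (by omega : (1:Int) < k)]
          simp only [hsign, List.foldl_cons, hmod, if_pos hev, if_neg hk1]
          have h0 : (1 : Int) * (1 + 1 * (-1)) = 0 := by ring
          rw [h0]
          simpa using pv_foldl_mul_zero (fun j => 1 + j * (-1)) (PySem.List.pyRange 2 k 1)
        · -- n odd: sign = 1, the product is k!
          have heven : Even (n - 1).toNat := ⟨(n / 2).toNat, by omega⟩
          have hsign : ((-1 : Int)) ^ (n - 1).toNat = 1 := Even.neg_one_pow heven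
          simp only [hsign, hmod, if_neg hev]
          have hm : k = 1 + ((k - 1).toNat : Int) := by omega
          rw [hm, pv_foldl_fact]
          congr 1

-- ===== VERDICT (by name: the statement is the Claim_ definition above) =====
theorem conf_space_euler_spec : Claim_equal_conf_space_euler := by
  intro k n _ hpre
  exact conf_space_euler_eq k n hpre
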